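-- pv_equiv track=rewrite | github.com/EtsuNDmA/stud_tasks | Python_functions/task_7.py | string_to_groups
-- ===== SOURCE A (Python) =====
-- VOWELS = 'a', 'e', 'i', 'o', 'u', 'y'
--
-- def string_to_groups(string):
--     list_words = string.split()
--     assert len(list_words) == 3, 'String have to consist of exactly 3 words'
--
--     result = {}
--     for word in list_words:
--         group0 = set()
--         group1 = set()
--         group2 = set()
--         for letter in word:
--             letter = letter.lower()
--             if letter in VOWELS:
--                 group0.add(letter)
--             elif 'a' <= letter <= 'm':
--                 group1.add(letter)
--             else:
--                 group2.add(letter)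
--         result[word] = group0, group1, group2
--     return result
-- ===== SOURCE B (Python) =====
-- VOWELS = 'a', 'e', 'i', 'o', 'u', 'y'
--
-- def string_to_groups(string):
--     # single streaming pass: build each word and its three groups together,
--     # no split() and no per-word inner loop
--     result = {}
--     count = 0
--     word = ''
--     groups = (set(), set(), set())
--     for ch in string:
--         if ch.isspace():
--             if word:
--                 result[word] = groups
--                 count += 1
--                 word = ''
--                 groups = (set(), set(), set())
--         else:
--             word += ch
--             letter = ch.lower()
--             k = 0 if letter in VOWELS else (1 if 'a' <= letter <= 'm' else 2)
--             groups[k].add(letter)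
--     if word:
--         result[word] = groups
--         count += 1
--     assert count == 3, 'String have to consist of exactly 3 words'
--     return result
-- ===== Notes on version B (the rewrite author's own statement) =====
-- stated objective: alternative
-- what changed: B drops split() and the nested per-word letter loop: a single streaming pass over the raw string detects word boundaries itself and builds each word together with its three groups via a computed group index into a tuple of sets, flushing a word into the result dict at each whitespace run.
import Mathlib
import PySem

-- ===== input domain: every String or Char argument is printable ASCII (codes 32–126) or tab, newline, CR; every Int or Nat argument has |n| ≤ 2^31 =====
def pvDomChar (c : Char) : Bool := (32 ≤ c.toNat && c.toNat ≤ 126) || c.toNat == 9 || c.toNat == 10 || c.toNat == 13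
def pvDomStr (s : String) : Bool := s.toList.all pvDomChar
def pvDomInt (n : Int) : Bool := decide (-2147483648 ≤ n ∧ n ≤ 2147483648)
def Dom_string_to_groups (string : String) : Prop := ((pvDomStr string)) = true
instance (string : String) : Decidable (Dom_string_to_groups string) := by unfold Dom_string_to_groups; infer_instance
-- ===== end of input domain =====

-- B replaces A's split()-then-nested-loops with a single streaming pass over the raw string that builds each word and its three groups together (table-indexed classification instead of if/elif adds); return value only (no observable mutation).


-- ===== PORT A =====
def pvVowels : List Char := ['a', 'e', 'i', 'o', 'u', 'y']

-- A iterates over a word's 1-character strings; the port works on the chars themselves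
-- (exact: 1-char strings ↔ chars is a bijection; 'a' <= letter <= 'm' on a 1-char string
-- is the code-point comparison on its char) and converts each set element to a 1-char
-- string at the end.
def pvC2S (c : Char) : String := String.ofList [c]

def pvGroupsA (word : List Char) : PySem.Set Char × PySem.Set Char × PySem.Set Char :=
  word.foldl (fun g ch =>
    let letter := PySem.Chars.lowerChar ch
    if pvVowels.contains letter then (PySem.Set.add g.1 letter, g.2.1, g.2.2)
    else if 'a' ≤ letter ∧ letter ≤ 'm' then (g.1, PySem.Set.add g.2.1 letter, g.2.2)
    else (g.1, g.2.1, PySem.Set.add g.2.2 letter))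
    (PySem.Set.empty, PySem.Set.empty, PySem.Set.empty)

def pvRender (g : PySem.Set Char × PySem.Set Char × PySem.Set Char) :
    List String × List String × List String :=
  (g.1.map pvC2S, g.2.1.map pvC2S, g.2.2.map pvC2S)

def string_to_groups (string : String) : List (String × List String × List String × List String) :=
  let listWords := PySem.Str.split₀ string
  (listWords.foldl (fun (d : PySem.Dict String (List String × List String × List String)) word =>
      d.insert word (pvRender (pvGroupsA word.toList)))
    PySem.Dict.empty).items

-- ===== PORT B =====
def pvEmptyG : PySem.Set Char × PySem.Set Char × PySem.Set Char :=
  (PySem.Set.empty, PySem.Set.empty, PySem.Set.empty)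

-- 'k = 0 if letter in VOWELS else (1 if 'a' <= letter <= 'm' else 2)'
def pvClassify (letter : Char) : Nat :=
  if pvVowels.contains letter then 0 else if 'a' ≤ letter ∧ letter ≤ 'm' then 1 else 2

-- 'groups[k].add(letter)'
def pvAddK (g : PySem.Set Char × PySem.Set Char × PySem.Set Char) (k : Nat) (c : Char) :
    PySem.Set Char × PySem.Set Char × PySem.Set Char :=
  match k with
  | 0 => (PySem.Set.add g.1 c, g.2.1, g.2.2)
  | 1 => (g.1, PySem.Set.add g.2.1 c, g.2.2)
  | _ => (g.1, g.2.1, PySem.Set.add g.2.2 c)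

-- loop state: (result, count, word, groups)
def pvStepB
    (st : PySem.Dict String (List String × List String × List String) × Nat × List Char ×
      (PySem.Set Char × PySem.Set Char × PySem.Set Char)) (ch : Char) :
    PySem.Dict String (List String × List String × List String) × Nat × List Char ×
      (PySem.Set Char × PySem.Set Char × PySem.Set Char) :=
  let (d, cnt, word, g) := st
  if PySem.Chars.isspace ch then
    if word = [] then (d, cnt, word, g)
    else (d.insert (String.ofList word) (pvRender g), cnt + 1, [], pvEmptyG)
  else
    let letter := PySem.Chars.lowerChar ch
    (d, cnt, word ++ [ch], pvAddK g (pvClassify letter) letter)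

-- the final 'if word: result[word] = groups'
def pvFinishB
    (st : PySem.Dict String (List String × List String × List String) × Nat × List Char ×
      (PySem.Set Char × PySem.Set Char × PySem.Set Char)) :
    PySem.Dict String (List String × List String × List String) :=
  let (d, _, word, g) := st
  if word = [] then d else d.insert (String.ofList word) (pvRender g)

def string_to_groups_alt (string : String) : List (String × List String × List String × List String) :=
  (pvFinishB (string.toList.foldl pvStepB (PySem.Dict.empty, 0, [], pvEmptyG))).items

-- ===== PRECONDITION & SPEC =====
-- A's assert raises AssertionError unless string splits into exactly 3 words; B asserts identically.
def Pre_string_to_groups (string : String) : Prop := (PySem.Str.split₀ string).length = 3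
instance (string : String) : Decidable (Pre_string_to_groups string) := by unfold Pre_string_to_groups; infer_instance
def pvWitness_string_to_groups : String := "Hello World 42!"

def Spec_string_to_groups (string : String) (out : List (String × List String × List String × List String)) : Prop := out = string_to_groups_alt string
instance (string : String) (out : List (String × List String × List String × List String)) : Decidable (Spec_string_to_groups string out) := by unfold Spec_string_to_groups; infer_instance

-- ===== CLAIM (what is proved, stated in full; the proofs are below) =====
def Claim_equal_string_to_groups : Prop := ∀ (string : String), Dom_string_to_groups string → Pre_string_to_groups string → Spec_string_to_groups string (string_to_groups string)

-- ===== LEMMAS AND PROOFS =====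

-- A's per-word insertion, as one step of a fold over the word list
def pvStepW (d : PySem.Dict String (List String × List String × List String)) (w : List Char) :
    PySem.Dict String (List String × List String × List String) :=
  d.insert (String.ofList w) (pvRender (pvGroupsA w))

theorem groupsA_snoc (w : List Char) (ch : Char) :
    pvGroupsA (w ++ [ch]) =
      pvAddK (pvGroupsA w) (pvClassify (PySem.Chars.lowerChar ch)) (PySem.Chars.lowerChar ch) := by
  unfold pvGroupsA
  rw [List.foldl_append]
  simp only [List.foldl_cons, List.foldl_nil]
  unfold pvAddK pvClassify
  split_ifs <;> rfl

theorem go_acc (chars : List Char) : ∀ (cur : List Char) (acc : List (List Char)),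
    PySem.Chars.split₀.go chars cur acc = acc.reverse ++ PySem.Chars.split₀.go chars cur [] := by
  induction chars with
  | nil =>
    intro cur acc
    simp only [PySem.Chars.split₀.go]
    by_cases h : cur.isEmpty <;> simp [h]
  | cons c rest ih =>
    intro cur acc
    simp only [PySem.Chars.split₀.go]
    by_cases hs : PySem.Chars.isspace c
    · by_cases h : cur.isEmpty
      · simp only [hs, h, if_true]
        exact ih [] acc
      · simp only [hs, h, if_true, if_false, Bool.false_eq_true]
        rw [ih [] (cur.reverse :: acc), ih [] [cur.reverse]]
        simp
    · simp only [hs, Bool.false_eq_true, if_false]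
      exact ih (c :: cur) acc

theorem scan_eq (chars : List Char) : ∀ (cur : List Char)
    (d : PySem.Dict String (List String × List String × List String)) (cnt : Nat),
    pvFinishB (chars.foldl pvStepB (d, cnt, cur, pvGroupsA cur)) =
      (PySem.Chars.split₀.go chars cur.reverse []).foldl pvStepW d := by
  induction chars with
  | nil =>
    intro cur d cnt
    simp only [List.foldl_nil, PySem.Chars.split₀.go, pvFinishB]
    by_cases h : cur = []
    · simp [h]
    · have : cur.reverse.isEmpty = false := by simp [h]
      simp [h, this, pvStepW]
  | cons c rest ih =>
    intro cur d cnt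
    simp only [List.foldl_cons, PySem.Chars.split₀.go]
    by_cases hs : PySem.Chars.isspace c
    · by_cases h : cur = []
      · subst h
        simp only [pvStepB, hs, List.reverse_nil, List.isEmpty_nil, if_pos]
        exact ih [] d cnt
      · have he : cur.reverse.isEmpty = false := by simp [h]
        simp only [pvStepB, hs, h, if_true, if_false, he, Bool.false_eq_true,
          List.reverse_reverse]
        rw [go_acc rest [] [cur]]
        have hg : pvEmptyG = pvGroupsA [] := rfl
        rw [hg, ih [] (d.insert (String.ofList cur) (pvRender (pvGroupsA cur))) (cnt + 1)]
        simp [pvStepW]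
    · simp only [pvStepB, hs, Bool.false_eq_true, if_false]
      rw [← groupsA_snoc]
      have := ih (cur ++ [c]) d cnt
      simpa using this

-- ===== VERDICT (by name: the statement is the Claim_ definition above) =====
theorem string_to_groups_spec : Claim_equal_string_to_groups := by
  intro s _ _
  show _ = _
  unfold string_to_groups string_to_groups_alt
  have h : pvEmptyG = pvGroupsA [] := rfl
  rw [h, scan_eq s.toList [] PySem.Dict.empty 0]
  simp only [PySem.Str.split₀, PySem.Chars.split₀, List.reverse_nil, List.foldl_map]
  congr 1
  apply PySem.List.foldl_congr_mem
  intro d w _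
  simp [pvStepW]
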